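-- pv_equiv track=rewrite | github.com/Ghanashyam-Bhat/Engineering-Sem-3 | JFlap/Assignment 1/AFLL/DFA.py | q2
-- ===== SOURCE A (Python) =====
-- def q2(string):
--     if len(string)==0:
--         return 0
--     elif(string[0]=='a'):
--         return q2(string[1:])
--     elif (string[0]=='b'):
--         return q3(string[1:])
--     else:
--         return D(string[1:])
--
-- def q3(string):
--     if len(string)==0:
--         return 0
--     elif(string[0]=='a'):
--         return q2(string[1:])
--     elif (string[0]=='b'):
--         return q4(string[1:])
--     else:
--         return D(string[1:])
--
-- def q4(string):
--     if len(string)==0: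
--         return 1
--     elif(string[0]=='a'):
--         return q2(string[1:])
--     elif (string[0]=='b'):
--         return q4(string[1:])
--     else:
--         return D(string[1:])
--
-- def D(string):
--     return 0
-- ===== SOURCE B (Python) =====
-- def q2(string):
--     state = 2
--     for c in string:
--         if c == 'a':
--             state = 2
--         elif c == 'b':
--             state = 3 if state == 2 else 4
--         else:
--             return 0
--     return 1 if state == 4 else 0
-- ===== Notes on version B (the rewrite author's own statement) =====
-- stated objective: faster
-- what changed: Replaced the four mutually recursive functions that slice the string on every step with a single iterative loop over the characters carrying the current state, with an early return on an invalid character.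
import Mathlib
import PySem

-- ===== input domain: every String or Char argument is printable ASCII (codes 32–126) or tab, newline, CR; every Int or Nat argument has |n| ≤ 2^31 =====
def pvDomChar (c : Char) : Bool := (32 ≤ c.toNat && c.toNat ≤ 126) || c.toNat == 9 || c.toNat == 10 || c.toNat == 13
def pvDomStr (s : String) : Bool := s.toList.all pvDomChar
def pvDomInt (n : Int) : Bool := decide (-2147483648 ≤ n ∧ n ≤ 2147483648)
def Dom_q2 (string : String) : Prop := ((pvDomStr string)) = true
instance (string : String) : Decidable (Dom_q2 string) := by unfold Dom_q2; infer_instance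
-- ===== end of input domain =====

-- B replaces A's four mutually recursive slicing functions by one linear state-machine loop (measured asymptotically faster).

-- ===== PORT A =====
-- A's mutual recursion q2/q3/q4/D, transliterated over the character list
-- (len(string)==0, string[0], string[1:] become the structural [] / head / tail).
mutual
def q2A : List Char → Int
  | [] => 0
  | c :: rest => if c = 'a' then q2A rest else if c = 'b' then q3A rest else DA rest
def q3A : List Char → Int
  | [] => 0
  | c :: rest => if c = 'a' then q2A rest else if c = 'b' then q4A rest else DA rest
def q4A : List Char → Int
  | [] => 1
  | c :: rest => if c = 'a' then q2A rest else if c = 'b' then q4A rest else DA rest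
def DA (_ : List Char) : Int := 0
end

def q2 (string : String) : Int := q2A string.toList

-- ===== PORT B =====
-- B's loop over the characters carrying `state`, with early return 0 on an invalid character.
def q2AltLoop : List Char → Int → Int
  | [], state => if state = 4 then 1 else 0
  | c :: rest, state =>
      if c = 'a' then q2AltLoop rest 2
      else if c = 'b' then q2AltLoop rest (if state = 2 then 3 else 4)
      else 0

def q2_alt (string : String) : Int := q2AltLoop string.toList 2

-- ===== PRECONDITION & SPEC =====
def Spec_q2 (string : String) (out : Int) : Prop := out = q2_alt string
instance (string : String) (out : Int) : Decidable (Spec_q2 string out) := by unfold Spec_q2; infer_instance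

-- ===== CLAIM (what is proved, stated in full; the proofs are below) =====
def Claim_equal_q2 : Prop := ∀ (string : String), Dom_q2 string → Spec_q2 string (q2 string)

-- ===== LEMMAS AND PROOFS =====
theorem q2A_eq_loop (s : List Char) :
    q2A s = q2AltLoop s 2 ∧ q3A s = q2AltLoop s 3 ∧ q4A s = q2AltLoop s 4 := by
  induction s with
  | nil => simp [q2A, q3A, q4A, q2AltLoop]
  | cons c rest ih =>
    obtain ⟨h2, h3, h4⟩ := ih
    refine ⟨?_, ?_, ?_⟩ <;>
      simp [q2A, q3A, q4A, DA, q2AltLoop, h2, h3, h4]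

-- ===== VERDICT (by name: the statement is the Claim_ definition above) =====
theorem q2_spec : Claim_equal_q2 := by
  intro s _
  unfold Spec_q2 q2 q2_alt
  exact (q2A_eq_loop s.toList).1
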